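-- pv_equiv track=rewrite | github.com/technion-cs-nlp/BetaDescribe-code | 2_reject_alternatives.py | provide_simple_print
-- ===== SOURCE A (Python) =====
-- DESCRIPTION_KEYS = ["FUNCTION$", "CATALYTIC ACTIVITY$", "PATHWAY$", "SUBCELLULAR LOCATION$", "DOMAIN$", "COFACTOR$", "PTM$", "SUBUNIT$", "SIMILARITY$", "INDUCTION$", "MISCELLANEOUS$", "ACTIVITY REGULATION$", "keywords:", "features:"]
--
-- def provide_simple_print(text, title = ''):
--     words_in_sentence = text.split()
--     idx_for_word = 0
--     preivous_idx_for_word = 0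
--     key = ''
--     previous_key = ''
--     previous_word = ''
--     description = {}
--     for idx, word in enumerate(words_in_sentence):
--         last_two_words = f'{previous_word} {word}'
--         if last_two_words == 'protein sequence:' and idx > 4:
--             idx -= 1
--             break
--         if last_two_words in DESCRIPTION_KEYS:
--             idx_for_word = idx
--             key = word
--             if previous_key != '':
--                 description[previous_key] = description.get(previous_key, [])
--                 description[previous_key].append(" ".join(words_in_sentence[preivous_idx_for_word+1: idx - 1]))
--             preivous_idx_for_word = idx_for_word
--             previous_key = last_two_words
--
--         if word in DESCRIPTION_KEYS:
--             idx_for_word = idx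
--             key = word
--             if previous_key != '':
--                 description[previous_key] = description.get(previous_key, [])
--                 description[previous_key].append(" ".join(words_in_sentence[preivous_idx_for_word+1: idx]))
--             preivous_idx_for_word = idx_for_word
--             previous_key = key
--         previous_word = word
--
--     description[previous_key] = description.get(previous_key, [])
--     description[previous_key].append(" ".join(words_in_sentence[preivous_idx_for_word+1:idx + 1]))
--
--     return description
-- ===== SOURCE B (Python) =====
-- DESCRIPTION_KEYS = ["FUNCTION$", "CATALYTIC ACTIVITY$", "PATHWAY$", "SUBCELLULAR LOCATION$", "DOMAIN$", "COFACTOR$", "PTM$", "SUBUNIT$", "SIMILARITY$", "INDUCTION$", "MISCELLANEOUS$", "ACTIVITY REGULATION$", "keywords:", "features:"]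
--
-- def provide_simple_print(text, title=''):
--     words = text.split()
--     # pass 1: collect header markers (key, word_index, is_two_word) and the effective end index
--     markers = []
--     end = len(words) - 1
--     for i, w in enumerate(words):
--         if w == 'sequence:' and i > 4 and words[i - 1] == 'protein':
--             end = i - 1
--             break
--         two = (words[i - 1] + ' ' + w) if i > 0 else ''
--         if two in DESCRIPTION_KEYS:
--             markers.append((two, i, True))
--         elif w in DESCRIPTION_KEYS:
--             markers.append((w, i, False))
--     if not markers:
--         markers = [('', 0, False)]
--     # pass 2: one segment per marker, bounded by the next marker (or the end)
--     description = {}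
--     for (k, i, _), nxt in zip(markers, markers[1:] + [None]):
--         stop = end + 1 if nxt is None else (nxt[1] - 1 if nxt[2] else nxt[1])
--         description.setdefault(k, []).append(' '.join(words[i + 1:stop]))
--     return description
-- ===== Notes on version B (the rewrite author's own statement) =====
-- stated objective: alternative
-- what changed: A's single-pass scan with six pieces of mutable loop state (previous key, previous index, previous word, dict mutated mid-scan) is replaced by a two-pass decomposition: pass 1 collects an ordered list of header markers (key, word index, is_two_word) plus the effective end index at the 'protein sequence:' break, pass 2 cuts one segment per consecutive marker pair.
-- outside the precondition, e.g. on provide_simple_print('', ''): A raises UnboundLocalError, B returns {'': ['']}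
-- crash fix: On texts with no words (empty or whitespace-only) A raises UnboundLocalError because its loop variable idx is never bound; B returns {'': ['']}. — e.g. on provide_simple_print("", ""): A raises UnboundLocalError, B returns [("", [""])]
import Mathlib
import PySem

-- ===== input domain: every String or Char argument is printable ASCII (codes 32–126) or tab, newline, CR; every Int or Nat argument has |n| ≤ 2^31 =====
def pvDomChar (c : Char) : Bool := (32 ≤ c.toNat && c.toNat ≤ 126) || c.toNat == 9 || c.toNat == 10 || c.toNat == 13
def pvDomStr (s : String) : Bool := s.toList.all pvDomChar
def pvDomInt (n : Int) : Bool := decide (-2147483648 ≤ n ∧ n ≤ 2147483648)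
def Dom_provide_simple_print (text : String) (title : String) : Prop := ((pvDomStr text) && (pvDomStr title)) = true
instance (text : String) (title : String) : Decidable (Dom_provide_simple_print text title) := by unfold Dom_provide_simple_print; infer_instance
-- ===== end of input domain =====

-- B replaces A's single-pass mutable-state scan by a two-pass decomposition (collect header
-- markers first, then cut one segment per marker); objective: alternative, same cost.

def pvKeys : List String := ["FUNCTION$", "CATALYTIC ACTIVITY$", "PATHWAY$", "SUBCELLULAR LOCATION$", "DOMAIN$", "COFACTOR$", "PTM$", "SUBUNIT$", "SIMILARITY$", "INDUCTION$", "MISCELLANEOUS$", "ACTIVITY REGULATION$", "keywords:", "features:"]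

-- shared by both ports: description[k] = description.get(k, []) ; description[k].append(s)
def pvEmit (d : PySem.Dict String (List String)) (k : String) (s : String) :
    PySem.Dict String (List String) :=
  d.insert k (d.getD k [] ++ [s])

-- shared by both ports: " ".join(words[a:b])
def pvJoin (words : List String) (a b : Int) : String :=
  PySem.Str.join " " (PySem.List.slice words (some a) (some b))

-- ===== PORT A =====
-- A's for-loop; returns (final idx, preivous_idx_for_word, previous_key, description)
def provideLoopA (words : List String) :
    List (Int × String) → Int → Int → String → String → PySem.Dict String (List String) →
    Int × Int × String × PySem.Dict String (List String)
  | [], curi, pidx, pkey, _pword, d => (curi, pidx, pkey, d)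
  | (idx, word) :: rest, _curi, pidx, pkey, pword, d =>
    let two := pword ++ " " ++ word
    if two == "protein sequence:" && decide (idx > 4) then
      (idx - 1, pidx, pkey, d)
    else
      let s1 : Int × String × PySem.Dict String (List String) :=
        if pvKeys.contains two then
          (idx, two, if pkey ≠ "" then pvEmit d pkey (pvJoin words (pidx + 1) (idx - 1)) else d)
        else (pidx, pkey, d)
      let s2 : Int × String × PySem.Dict String (List String) :=
        if pvKeys.contains word then
          (idx, word,
            if s1.2.1 ≠ "" then pvEmit s1.2.2 s1.2.1 (pvJoin words (s1.1 + 1) idx) else s1.2.2)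
        else s1
      provideLoopA words rest idx s2.1 s2.2.1 word s2.2.2

def provide_simple_print (text : String) (title : String) : List (String × List String) :=
  let words := PySem.Str.split₀ text
  let r := provideLoopA words (PySem.List.enumerate words 0) (-1) 0 "" "" PySem.Dict.empty
  (pvEmit r.2.2.2 r.2.2.1 (pvJoin words (r.2.1 + 1) (r.1 + 1))).items

-- ===== PORT B =====
-- B pass 1: collect (key, word_index, is_two_word) markers and the effective end index
def provideScanB (words : List String) :
    List (Int × String) → List (String × Int × Bool) → List (String × Int × Bool) × Int
  | [], acc => (acc, (words.length : Int) - 1)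
  | (i, w) :: rest, acc =>
    if w == "sequence:" && decide (i > 4) && (PySem.List.pyGet? words (i - 1) == some "protein") then
      (acc, i - 1)
    else
      let two := if (0 : Int) < i then (PySem.List.pyGet? words (i - 1)).getD "" ++ " " ++ w else ""
      if pvKeys.contains two then provideScanB words rest (acc ++ [(two, i, true)])
      else if pvKeys.contains w then provideScanB words rest (acc ++ [(w, i, false)])
      else provideScanB words rest acc

-- B pass 2: one segment per marker, bounded by the next marker (or the end index)
def provideEmitB (words : List String) (endi : Int) :
    List (String × Int × Bool) → PySem.Dict String (List String) →
    PySem.Dict String (List String)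
  | [], d => d
  | [(k, i, _)], d => pvEmit d k (pvJoin words (i + 1) (endi + 1))
  | (k, i, _) :: (nk, ni, ntwo) :: ms, d =>
    provideEmitB words endi ((nk, ni, ntwo) :: ms)
      (pvEmit d k (pvJoin words (i + 1) (if ntwo then ni - 1 else ni)))

def provide_simple_print_alt (text : String) (title : String) : List (String × List String) :=
  let words := PySem.Str.split₀ text
  let r := provideScanB words (PySem.List.enumerate words 0) []
  (provideEmitB words r.2 (if r.1.isEmpty then [("", 0, false)] else r.1) PySem.Dict.empty).items

-- ===== PRECONDITION & SPEC =====
-- Pre_ excludes texts with no words (empty / whitespace-only), on which Python A raises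
-- UnboundLocalError (its loop variable idx is never bound).
def Pre_provide_simple_print (text : String) (title : String) : Prop :=
  PySem.Str.split₀ text ≠ []
instance (text : String) (title : String) : Decidable (Pre_provide_simple_print text title) := by
  unfold Pre_provide_simple_print; infer_instance

def pvWitness_provide_simple_print : String × String := ("FUNCTION$ binds ATP keywords: kinase", "")

-- On texts with no words A raises UnboundLocalError; B returns the dict {'': ['']}.
def Raises_provide_simple_print (text : String) (title : String) : Prop :=
  PySem.Str.split₀ text = []
instance (text : String) (title : String) : Decidable (Raises_provide_simple_print text title) := by
  unfold Raises_provide_simple_print; infer_instance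
def pvRaiseWitness_provide_simple_print : String × String := ("", "")
def pvRaiseWitnessOut_provide_simple_print : List (String × List String) := [("", [""])]

def Spec_provide_simple_print (text : String) (title : String) (out : List (String × List String)) : Prop := out = provide_simple_print_alt text title
instance (text : String) (title : String) (out : List (String × List String)) : Decidable (Spec_provide_simple_print text title out) := by unfold Spec_provide_simple_print; infer_instance

-- ===== CLAIM (what is proved, stated in full; the proofs are below) =====
def Claim_equal_provide_simple_print : Prop := ∀ (text : String) (title : String), Dom_provide_simple_print text title → Pre_provide_simple_print text title → Spec_provide_simple_print text title (provide_simple_print text title)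

def Claim_raises_provide_simple_print : Prop := (∀ (text : String) (title : String), Dom_provide_simple_print text title → Raises_provide_simple_print text title → ¬ Pre_provide_simple_print text title) ∧ (Dom_provide_simple_print (pvRaiseWitness_provide_simple_print.1) (pvRaiseWitness_provide_simple_print.2) ∧ Raises_provide_simple_print (pvRaiseWitness_provide_simple_print.1) (pvRaiseWitness_provide_simple_print.2) ∧ provide_simple_print_alt (pvRaiseWitness_provide_simple_print.1) (pvRaiseWitness_provide_simple_print.2) = pvRaiseWitnessOut_provide_simple_print)

-- ===== LEMMAS AND PROOFS =====

-- pair-segments part of B's second pass: all segments except the last marker's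
def pvPairs (words : List String) :
    List (String × Int × Bool) → PySem.Dict String (List String) →
    PySem.Dict String (List String)
  | [], d => d
  | [_], d => d
  | (k, i, _) :: (nk, ni, ntwo) :: ms, d =>
    pvPairs words ((nk, ni, ntwo) :: ms) (pvEmit d k (pvJoin words (i + 1) (if ntwo then ni - 1 else ni)))

-- link between A's loop state and B's accumulated markers
def pvInv (words : List String) (acc : List (String × Int × Bool)) (pidx : Int) (pkey : String)
    (d : PySem.Dict String (List String)) : Prop :=
  (acc = [] ∧ pidx = 0 ∧ pkey = "" ∧ d = PySem.Dict.empty)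
  ∨ (∃ acc' b, acc = acc' ++ [(pkey, pidx, b)] ∧ pkey ≠ "" ∧
      pvPairs words acc PySem.Dict.empty = d)

lemma pvSplitSpaceL {s t a b : List Char} (ha : ' ' ∉ a) (hb : ' ' ∉ b) :
    s ++ ' ' :: t = a ++ ' ' :: b ↔ s = a ∧ t = b := by
  constructor
  · intro h
    rcases List.append_eq_append_iff.mp h with ⟨w, hw1, hw2⟩ | ⟨w, hw1, hw2⟩
    · cases w with
      | nil => simp at hw1 hw2; exact ⟨hw1.symm, hw2⟩
      | cons c w' =>
        cases hw2
        exact absurd (by simp [hw1] : ' ' ∈ a) ha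
    · cases w with
      | nil => simp at hw1 hw2; exact ⟨hw1, hw2.symm⟩
      | cons c w' =>
        cases hw2
        exact absurd (by simp : ' ' ∈ ' ' :: t) (by simp_all)
  · rintro ⟨rfl, rfl⟩; rfl

lemma pvTwoEq (s t a b : String) (ha : ' ' ∉ a.toList) (hb : ' ' ∉ b.toList) :
    s ++ " " ++ t = a ++ " " ++ b ↔ s = a ∧ t = b := by
  have hsp : (" " : String).toList = [' '] := rfl
  rw [← String.toList_inj, ← String.toList_inj (s₁ := s) (s₂ := a), ← String.toList_inj (s₁ := t) (s₂ := b)]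
  simp only [String.toList_append, hsp, List.append_assoc, List.singleton_append]
  exact pvSplitSpaceL ha hb

lemma pvNoSpaceNe (s t k : String) (hk : ' ' ∉ k.toList) : s ++ " " ++ t ≠ k := by
  intro h
  apply hk
  rw [← h]
  simp

lemma pvLeadNe (u k : String) (hk : k.toList.head? ≠ some ' ') : " " ++ u ≠ k := by
  intro h
  apply hk
  rw [← h]
  have hsp : (" " : String).toList = [' '] := rfl
  simp [String.toList_append, hsp]

lemma pvContainsLead (u : String) : pvKeys.contains (" " ++ u) = false := by
  have hnm : (" " ++ u) ∉ pvKeys := by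
    intro hmem
    simp only [pvKeys, List.mem_cons, List.not_mem_nil, or_false] at hmem
    rcases hmem with h|h|h|h|h|h|h|h|h|h|h|h|h|h <;> exact pvLeadNe u _ (by decide) h
  simpa using hnm

lemma pvBreakIff (s t : String) : (s ++ " " ++ t = "protein sequence:") ↔ (s = "protein" ∧ t = "sequence:") := by
  have h : ("protein sequence:" : String) = "protein" ++ " " ++ "sequence:" := by decide
  rw [h]
  exact pvTwoEq s t _ _ (by decide) (by decide)

lemma pvTwoKey (s t : String) (h : pvKeys.contains (s ++ " " ++ t) = true) :
    pvKeys.contains t = false := by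
  have hmem : (s ++ " " ++ t) ∈ pvKeys := by simpa using h
  simp only [pvKeys, List.mem_cons, List.not_mem_nil, or_false] at hmem
  rcases hmem with h|h|h|h|h|h|h|h|h|h|h|h|h|h
  · exact absurd h (pvNoSpaceNe s t _ (by decide))
  · have h2 : ("CATALYTIC ACTIVITY$" : String) = "CATALYTIC" ++ " " ++ "ACTIVITY$" := by decide
    obtain ⟨-, rfl⟩ := (pvTwoEq s t _ _ (by decide) (by decide)).mp (h.trans h2)
    decide
  · exact absurd h (pvNoSpaceNe s t _ (by decide))
  · have h2 : ("SUBCELLULAR LOCATION$" : String) = "SUBCELLULAR" ++ " " ++ "LOCATION$" := by decide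
    obtain ⟨-, rfl⟩ := (pvTwoEq s t _ _ (by decide) (by decide)).mp (h.trans h2)
    decide
  · exact absurd h (pvNoSpaceNe s t _ (by decide))
  · exact absurd h (pvNoSpaceNe s t _ (by decide))
  · exact absurd h (pvNoSpaceNe s t _ (by decide))
  · exact absurd h (pvNoSpaceNe s t _ (by decide))
  · exact absurd h (pvNoSpaceNe s t _ (by decide))
  · exact absurd h (pvNoSpaceNe s t _ (by decide))
  · exact absurd h (pvNoSpaceNe s t _ (by decide))
  · have h2 : ("ACTIVITY REGULATION$" : String) = "ACTIVITY" ++ " " ++ "REGULATION$" := by decide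
    obtain ⟨-, rfl⟩ := (pvTwoEq s t _ _ (by decide) (by decide)).mp (h.trans h2)
    decide
  · exact absurd h (pvNoSpaceNe s t _ (by decide))
  · exact absurd h (pvNoSpaceNe s t _ (by decide))

lemma pvEmitB_snoc (words : List String) (e : Int) (k : String) (i : Int) (b : Bool) :
    ∀ (acc : List (String × Int × Bool)) (d : PySem.Dict String (List String)),
    provideEmitB words e (acc ++ [(k, i, b)]) d
      = pvEmit (pvPairs words (acc ++ [(k, i, b)]) d) k (pvJoin words (i + 1) (e + 1)) := by
  intro acc
  induction acc with
  | nil => intro d; simp [provideEmitB, pvPairs]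
  | cons m1 acc' ih =>
    intro d
    cases acc' with
    | nil => simp [provideEmitB, pvPairs]
    | cons m2 acc'' =>
      simp only [List.cons_append, provideEmitB, pvPairs]
      exact ih _

lemma pvPairs_snoc (words : List String) (k0 : String) (i0 : Int) (b0 : Bool)
    (k : String) (i : Int) (b : Bool) :
    ∀ (acc : List (String × Int × Bool)) (d : PySem.Dict String (List String)),
    pvPairs words ((acc ++ [(k0, i0, b0)]) ++ [(k, i, b)]) d
      = pvEmit (pvPairs words (acc ++ [(k0, i0, b0)]) d) k0
          (pvJoin words (i0 + 1) (if b then i - 1 else i)) := by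
  intro acc
  induction acc with
  | nil => intro d; simp [pvPairs]
  | cons m1 acc' ih =>
    intro d
    cases acc' with
    | nil => simp [pvPairs]
    | cons m2 acc'' =>
      simp only [List.cons_append, pvPairs]
      exact ih _

lemma pvFinish (words : List String) (acc : List (String × Int × Bool)) (pidx : Int)
    (pkey : String) (d : PySem.Dict String (List String)) (e : Int)
    (hinv : pvInv words acc pidx pkey d) :
    provideEmitB words e (if acc.isEmpty then [("", 0, false)] else acc) PySem.Dict.empty
      = pvEmit d pkey (pvJoin words (pidx + 1) (e + 1)) := by
  rcases hinv with ⟨rfl, rfl, rfl, rfl⟩ | ⟨acc', b, rfl, hpk, hpairs⟩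
  · simp [provideEmitB]
  · rw [if_neg (by simp)]
    rw [pvEmitB_snoc, hpairs]

lemma pvMain (words : List String) :
    ∀ (m n : Nat), words.length - n = m → n ≤ words.length →
    ∀ (pidx : Int) (pkey pword : String) (d : PySem.Dict String (List String))
      (acc : List (String × Int × Bool)),
    pword = (if n = 0 then "" else words.getD (n - 1) "") →
    pvInv words acc pidx pkey d →
    (let r := provideLoopA words (PySem.List.enumerate (words.drop n) n) ((n : Int) - 1) pidx pkey pword d
     pvEmit r.2.2.2 r.2.2.1 (pvJoin words (r.2.1 + 1) (r.1 + 1)))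
    = (let r := provideScanB words (PySem.List.enumerate (words.drop n) n) acc
       provideEmitB words r.2 (if r.1.isEmpty then [("", 0, false)] else r.1) PySem.Dict.empty) := by
  intro m
  induction m with
  | zero =>
    intro n hm hn pidx pkey pword d acc hpw hinv
    have hlen : n = words.length := by omega
    have hdrop : words.drop n = [] := by simp [hlen]
    rw [hdrop]
    simp only [PySem.List.enumerate_nil, provideLoopA, provideScanB]
    have he : ((words.length : Int) - 1) = (n : Int) - 1 := by rw [hlen]
    rw [he]
    exact (pvFinish words acc pidx pkey d ((n : Int) - 1) hinv).symm
  | succ m ih =>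
    intro n hm hn pidx pkey pword d acc hpw hinv
    have hlt : n < words.length := by omega
    have hdrop : words.drop n = words[n] :: words.drop (n + 1) := (List.getElem_cons_drop hlt).symm
    rw [hdrop, PySem.List.enumerate_cons]
    have hpw' : words[n] = (if n + 1 = 0 then "" else words.getD (n + 1 - 1) "") := by
      rw [if_neg (by omega)]
      simp [List.getD_eq_getElem words "" (by simpa using hlt), List.getElem?_eq_getElem hlt]
    have hcast : (((n + 1 : Nat)) : Int) = ((n : Int) + 1) := by push_cast; ring
    have hcast2 : (((n + 1 : Nat)) : Int) - 1 = (n : Int) := by push_cast; ring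
    have hbreak : ((pword ++ " " ++ words[n] == "protein sequence:") && decide ((n : Int) > 4))
        = ((words[n] == "sequence:") && decide ((n : Int) > 4)
            && (PySem.List.pyGet? words ((n : Int) - 1) == some "protein")) := by
      by_cases h4 : ((n : Int) > 4)
      · have hn0 : ¬ (n = 0) := by omega
        have hidx : PySem.List.pyGet? words ((n : Int) - 1) = some (words.getD (n - 1) "") := by
          have hc : ((n : Int) - 1) = ((n - 1 : Nat) : Int) := by omega
          rw [hc, PySem.List.pyGet?_natCast,
            List.getElem?_eq_getElem (show n - 1 < words.length by omega),
            List.getD_eq_getElem words "" (show n - 1 < words.length by omega)]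
        rw [hidx, hpw, if_neg hn0, Bool.eq_iff_iff]
        simp only [Bool.and_eq_true, beq_iff_eq, decide_eq_true_eq, Option.some.injEq]
        rw [pvBreakIff]
        constructor
        · rintro ⟨⟨h1, h2⟩, -⟩; exact ⟨⟨h2, h4⟩, h1⟩
        · rintro ⟨⟨h2, -⟩, h1⟩; exact ⟨⟨h1, h2⟩, h4⟩
      · rw [Bool.eq_iff_iff]
        simp [h4]
    by_cases hbr : ((words[n] == "sequence:") && decide ((n : Int) > 4)
        && (PySem.List.pyGet? words ((n : Int) - 1) == some "protein")) = true
    · simp only [provideLoopA, provideScanB, hbreak, hbr, if_true]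
      have h := (pvFinish words acc pidx pkey d ((n : Int) - 1) hinv).symm
      simpa using h
    · have hbrE : ((pword ++ " " ++ words[n] == "protein sequence:") && decide ((n : Int) > 4)) = false := by
        rw [hbreak]; exact Bool.eq_false_iff.mpr (fun h => hbr h)
      have hbrE2 : ((words[n] == "sequence:") && decide ((n : Int) > 4)
          && (PySem.List.pyGet? words ((n : Int) - 1) == some "protein")) = false :=
        Bool.eq_false_iff.mpr (fun h => hbr h)
      by_cases hn0 : n = 0
      · obtain rfl : pword = "" := by simpa [hn0] using hpw
        subst hn0
        have hA0 : ("" : String) ++ " " ++ words[0] = " " ++ words[0] := by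
          rw [← String.toList_inj]
          simp [String.toList_append]
        have hcA : pvKeys.contains (("" : String) ++ " " ++ words[0]) = false := by
          rw [hA0]; exact pvContainsLead _
        have hiz : ¬ ((0 : Int) < ((0 : Nat) : Int)) := by norm_num
        have hce : pvKeys.contains ("" : String) = false := by decide
        by_cases hcw : pvKeys.contains words[0] = true
        · have hnew : words[0] ≠ "" := by
            intro hw0; rw [hw0] at hcw; exact absurd hcw (by decide)
          rcases hinv with ⟨rfl, rfl, rfl, rfl⟩ | ⟨acc', b0, rfl, hpk, hpairs⟩
          · have hinv' : pvInv words ([] ++ [(words[0], ((0 : Nat) : Int), false)])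
                ((0 : Nat) : Int) words[0] PySem.Dict.empty := by
              right
              exact ⟨[], false, rfl, hnew, by simp [pvPairs]⟩
            have IH := ih (0 + 1) (by omega) (by omega) ((0 : Nat) : Int) words[0] words[0]
              PySem.Dict.empty ([] ++ [(words[0], ((0 : Nat) : Int), false)]) hpw' hinv'
            rw [hcast2, hcast] at IH
            simp only [provideLoopA, provideScanB, hbrE, hbrE2, hcA, hcw, hce,
              Bool.false_eq_true, if_false, if_true, if_neg hiz, ne_eq, not_true_eq_false,
              List.nil_append]
            simp only [List.nil_append] at IH
            simpa using IH
          · have hinv' : pvInv words ((acc' ++ [(pkey, pidx, b0)]) ++ [(words[0], ((0 : Nat) : Int), false)])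
                ((0 : Nat) : Int) words[0]
                (pvEmit d pkey (pvJoin words (pidx + 1) ((0 : Nat) : Int))) := by
              right
              refine ⟨acc' ++ [(pkey, pidx, b0)], false, rfl, hnew, ?_⟩
              rw [pvPairs_snoc, hpairs]
              simp
            have IH := ih (0 + 1) (by omega) (by omega) ((0 : Nat) : Int) words[0] words[0]
              (pvEmit d pkey (pvJoin words (pidx + 1) ((0 : Nat) : Int)))
              ((acc' ++ [(pkey, pidx, b0)]) ++ [(words[0], ((0 : Nat) : Int), false)]) hpw' hinv'
            rw [hcast2, hcast] at IH
            simp only [provideLoopA, provideScanB, hbrE, hbrE2, hcA, hcw, hce,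
              Bool.false_eq_true, if_false, if_true, if_neg hiz, ne_eq, if_pos hpk]
            simpa [hpk] using IH
        · have hcwE : pvKeys.contains words[0] = false := Bool.eq_false_iff.mpr (fun h => hcw h)
          have IH := ih (0 + 1) (by omega) (by omega) pidx pkey words[0] d acc hpw' hinv
          rw [hcast2, hcast] at IH
          simp only [provideLoopA, provideScanB, hbrE, hbrE2, hcA, hcwE, hce,
            Bool.false_eq_true, if_false, if_neg hiz]
          simpa using IH
      · have hpw2 : pword = words.getD (n - 1) "" := by rw [hpw, if_neg hn0]
        subst hpw2
        have hidx : PySem.List.pyGet? words ((n : Int) - 1) = some (words.getD (n - 1) "") := by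
          have hc : ((n : Int) - 1) = ((n - 1 : Nat) : Int) := by omega
          rw [hc, PySem.List.pyGet?_natCast,
            List.getElem?_eq_getElem (show n - 1 < words.length by omega),
            List.getD_eq_getElem words "" (show n - 1 < words.length by omega)]
        have hpos : (0 : Int) < ((n : Nat) : Int) := by omega
        by_cases hc2 : pvKeys.contains (words.getD (n - 1) "" ++ " " ++ words[n]) = true
        · have hcwE : pvKeys.contains words[n] = false := pvTwoKey _ _ hc2
          have hne : words.getD (n - 1) "" ++ " " ++ words[n] ≠ "" :=
            pvNoSpaceNe _ _ "" (by decide)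
          rcases hinv with ⟨rfl, rfl, rfl, rfl⟩ | ⟨acc', b0, rfl, hpk, hpairs⟩
          · have hinv' : pvInv words ([] ++ [(words.getD (n - 1) "" ++ " " ++ words[n], ((n : Nat) : Int), true)])
                ((n : Nat) : Int) (words.getD (n - 1) "" ++ " " ++ words[n]) PySem.Dict.empty := by
              right
              exact ⟨[], true, rfl, hne, by simp [pvPairs]⟩
            have IH := ih (n + 1) (by omega) (by omega) ((n : Nat) : Int)
              (words.getD (n - 1) "" ++ " " ++ words[n]) words[n]
              PySem.Dict.empty ([] ++ [(words.getD (n - 1) "" ++ " " ++ words[n], ((n : Nat) : Int), true)]) hpw' hinv'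
            rw [hcast2, hcast] at IH
            simp only [provideLoopA, provideScanB, hbrE, hbrE2, Bool.false_eq_true, if_false]
            simp only [hidx, Option.getD_some, if_pos hpos, hc2, hcwE, if_true,
              ne_eq, not_true_eq_false, List.nil_append]
            simp only [List.nil_append] at IH
            simpa using IH
          · have hinv' : pvInv words
                ((acc' ++ [(pkey, pidx, b0)]) ++ [(words.getD (n - 1) "" ++ " " ++ words[n], ((n : Nat) : Int), true)])
                ((n : Nat) : Int) (words.getD (n - 1) "" ++ " " ++ words[n])
                (pvEmit d pkey (pvJoin words (pidx + 1) (((n : Nat) : Int) - 1))) := by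
              right
              refine ⟨acc' ++ [(pkey, pidx, b0)], true, rfl, hne, ?_⟩
              rw [pvPairs_snoc, hpairs]
              simp
            have IH := ih (n + 1) (by omega) (by omega) ((n : Nat) : Int)
              (words.getD (n - 1) "" ++ " " ++ words[n]) words[n]
              (pvEmit d pkey (pvJoin words (pidx + 1) (((n : Nat) : Int) - 1)))
              ((acc' ++ [(pkey, pidx, b0)]) ++ [(words.getD (n - 1) "" ++ " " ++ words[n], ((n : Nat) : Int), true)]) hpw' hinv'
            rw [hcast2, hcast] at IH
            simp only [provideLoopA, provideScanB, hbrE, hbrE2, Bool.false_eq_true, if_false]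
            simp only [hidx, hc2, hcwE,
              if_true, if_pos hpos, Option.getD_some,
              ne_eq, if_pos hpk]
            simpa [hpk] using IH
        · have hc2E : pvKeys.contains (words.getD (n - 1) "" ++ " " ++ words[n]) = false :=
            Bool.eq_false_iff.mpr (fun h => hc2 h)
          by_cases hcw : pvKeys.contains words[n] = true
          · have hnew : words[n] ≠ "" := by
              intro hw0; rw [hw0] at hcw; exact absurd hcw (by decide)
            rcases hinv with ⟨rfl, rfl, rfl, rfl⟩ | ⟨acc', b0, rfl, hpk, hpairs⟩
            · have hinv' : pvInv words ([] ++ [(words[n], ((n : Nat) : Int), false)])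
                  ((n : Nat) : Int) words[n] PySem.Dict.empty := by
                right
                exact ⟨[], false, rfl, hnew, by simp [pvPairs]⟩
              have IH := ih (n + 1) (by omega) (by omega) ((n : Nat) : Int) words[n] words[n]
                PySem.Dict.empty ([] ++ [(words[n], ((n : Nat) : Int), false)]) hpw' hinv'
              rw [hcast2, hcast] at IH
              simp only [provideLoopA, provideScanB, hbrE, hbrE2, Bool.false_eq_true, if_false]
              simp only [hidx, hc2E, hcw,
                if_true, if_pos hpos, Option.getD_some,
                ne_eq, not_true_eq_false, List.nil_append]
              simp only [List.nil_append] at IH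
              simpa using IH
            · have hinv' : pvInv words ((acc' ++ [(pkey, pidx, b0)]) ++ [(words[n], ((n : Nat) : Int), false)])
                  ((n : Nat) : Int) words[n]
                  (pvEmit d pkey (pvJoin words (pidx + 1) ((n : Nat) : Int))) := by
                right
                refine ⟨acc' ++ [(pkey, pidx, b0)], false, rfl, hnew, ?_⟩
                rw [pvPairs_snoc, hpairs]
                simp
              have IH := ih (n + 1) (by omega) (by omega) ((n : Nat) : Int) words[n] words[n]
                (pvEmit d pkey (pvJoin words (pidx + 1) ((n : Nat) : Int)))
                ((acc' ++ [(pkey, pidx, b0)]) ++ [(words[n], ((n : Nat) : Int), false)]) hpw' hinv'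
              rw [hcast2, hcast] at IH
              simp only [provideLoopA, provideScanB, hbrE, hbrE2, Bool.false_eq_true, if_false]
              simp only [hidx, hc2E, hcw,
                if_true, if_pos hpos, Option.getD_some,
                ne_eq, if_pos hpk]
              simpa [hpk] using IH
          · have hcwE : pvKeys.contains words[n] = false := Bool.eq_false_iff.mpr (fun h => hcw h)
            have IH := ih (n + 1) (by omega) (by omega) pidx pkey words[n] d acc hpw' hinv
            rw [hcast2, hcast] at IH
            simp only [provideLoopA, provideScanB, hbrE, hbrE2, Bool.false_eq_true, if_false]
            simp only [hidx, hc2E, hcwE,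
              if_pos hpos, Option.getD_some]
            simpa using IH

theorem provide_simple_print_spec : Claim_equal_provide_simple_print := by
  intro text title _hdom _hpre
  unfold Spec_provide_simple_print provide_simple_print provide_simple_print_alt
  have h := pvMain (PySem.Str.split₀ text) (PySem.Str.split₀ text).length 0 (by omega) (by omega)
    0 "" "" PySem.Dict.empty [] (by simp) (Or.inl ⟨rfl, rfl, rfl, rfl⟩)
  simp only [List.drop_zero] at h
  have hc : (((0 : Nat) : Int) - 1) = (-1 : Int) := by norm_num
  rw [hc] at h
  exact congrArg PySem.Dict.items h

def provide_simple_print_raises : Claim_raises_provide_simple_print := by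
  unfold Claim_raises_provide_simple_print
  constructor
  · intro text title _ hr hp; exact hp hr
  · refine ⟨by decide, by decide, by decide⟩
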